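-- pv_equiv track=rewrite | github.com/LocusLontrime/Python | HWSem2/HomeWorkSem2.py | get_fib_list
-- ===== SOURCE A (Python) =====
-- def get_fib_list(n):
--     """
--     :param n: the length of the one wing of a fibs_list being built
--     :return: list of fib numbers from -n to n
--     """
--     f1, f2, fibs_list = 1, 0, [0]
--     for i in range(0, n):
--         f2 = f2 + f1  # a next fib
--         f1 = f2 - f1  # one before next
--         fibs_list.append(f2)
--         fibs_list.insert(0, f2 if i % 2 == 0 else -f2)  # building of the negative-wing of a fibs_list
--     return fibs_list
-- ===== SOURCE B (Python) =====
-- def get_fib_list(n):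
--     """
--     :param n: the length of the one wing of a fibs_list being built
--     :return: list of fib numbers from -n to n
--     """
--     fibs = [0]
--     a, b = 0, 1
--     for _ in range(n):
--         fibs.append(b)
--         a, b = b, a + b
--     neg = [fibs[k] if k % 2 == 1 else -fibs[k] for k in range(n, 0, -1)]
--     return neg + fibs
-- ===== Notes on version B (the rewrite author's own statement) =====
-- stated objective: simpler
-- what changed: B builds the positive Fibonacci table in one forward pass and then derives the negative wing by indexing back into that table, negating the entries of even index, instead of A's interleaved append-plus-insert-at-front loop that grows both wings at once.
import Mathlib
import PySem

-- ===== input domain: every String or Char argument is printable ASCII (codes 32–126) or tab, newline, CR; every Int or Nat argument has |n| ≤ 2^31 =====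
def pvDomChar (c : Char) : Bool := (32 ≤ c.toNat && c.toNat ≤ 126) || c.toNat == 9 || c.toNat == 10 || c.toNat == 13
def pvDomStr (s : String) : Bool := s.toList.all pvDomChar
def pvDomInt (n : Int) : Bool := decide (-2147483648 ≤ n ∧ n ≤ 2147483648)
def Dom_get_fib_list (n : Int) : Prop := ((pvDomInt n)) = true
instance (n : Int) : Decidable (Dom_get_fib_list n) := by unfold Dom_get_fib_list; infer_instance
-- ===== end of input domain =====

-- B builds the positive table first, then derives the negative wing by reading the table
-- back with the sign rule F(-k) = (-1)^(k+1) F(k); simpler decomposition, same exact values.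

-- ===== PORT A =====
-- A: interleaved loop maintaining f1, f2 and appending/prepending into one list.
def get_fib_list (n : Int) : List Int :=
  ((PySem.List.pyRange 0 n 1).foldl
    (fun (st : Int × Int × List Int) i =>
      let f2 := st.2.1 + st.1
      let f1 := f2 - st.1
      let fibs := st.2.2 ++ [f2]
      (f1, f2, (if PySem.Int.mod i 2 = 0 then f2 else -f2) :: fibs))
    (1, 0, [0])).2.2

-- ===== PORT B =====
-- B: one forward pass building fibs = [F(0)..F(n)], then the negative wing read off that
-- table by index with a parity sign; pyGetD's default is never used (indices are in range).
def get_fib_list_alt (n : Int) : List Int :=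
  let s := (PySem.List.pyRange 0 n 1).foldl
    (fun (st : Int × Int × List Int) _ =>
      (st.2.1, st.1 + st.2.1, st.2.2 ++ [st.2.1]))
    (0, 1, [0])
  let fibs := s.2.2
  let neg := (PySem.List.pyRange n 0 (-1)).map
    (fun k => if PySem.Int.mod k 2 = 1 then PySem.List.pyGetD fibs k 0
              else -(PySem.List.pyGetD fibs k 0))
  neg ++ fibs

-- ===== PRECONDITION & SPEC =====
def Spec_get_fib_list (n : Int) (out : List Int) : Prop := out = get_fib_list_alt n
instance (n : Int) (out : List Int) : Decidable (Spec_get_fib_list n out) := by unfold Spec_get_fib_list; infer_instance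

-- ===== CLAIM =====
def Claim_equal_get_fib_list : Prop := ∀ (n : Int), Dom_get_fib_list n → Spec_get_fib_list n (get_fib_list n)

-- ===== LEMMAS AND PROOFS =====

def pvFib : Nat → Int
  | 0 => 0
  | 1 => 1
  | (k+2) => pvFib k + pvFib (k+1)

def pvPos (m : Nat) : List Int := (List.range (m+1)).map pvFib

def pvNegel (k : Nat) : Int := if k % 2 = 1 then pvFib k else -pvFib k

def pvNeg (m : Nat) : List Int := ((List.range m).map (fun j => pvNegel (j+1))).reverse

theorem pvA_fold (m : Nat) :
    ((List.range m).foldl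
      (fun (st : Int × Int × List Int) (j : Nat) =>
        (st.2.1 + st.1 - st.1, st.2.1 + st.1,
          (if PySem.Int.mod (j : Int) 2 = 0 then st.2.1 + st.1 else -(st.2.1 + st.1)) ::
            (st.2.2 ++ [st.2.1 + st.1])))
      (1, 0, [0]))
    = (pvFib (m+1) - pvFib m, pvFib m, pvNeg m ++ pvPos m) := by
  induction m with
  | zero => simp [pvFib, pvNeg, pvPos]
  | succ m ih =>
      rw [List.range_succ, List.foldl_append, ih]
      have hmod : PySem.Int.mod ((m : Int)) 2 = ((m % 2 : Nat) : Int) := by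
        exact_mod_cast PySem.Int.mod_natCast m 2
      have hpos : pvPos (m+1) = pvPos m ++ [pvFib (m+1)] := by
        simp [pvPos, List.range_succ]
      have hneg : pvNeg (m+1) = pvNegel (m+1) :: pvNeg m := by
        simp [pvNeg, List.range_succ]
      have h2 : pvFib m + (pvFib (m+1) - pvFib m) = pvFib (m+1) := by ring
      have hel : (if ((m % 2 : Nat) : Int) = 0 then pvFib (m+1) else -pvFib (m+1))
          = pvNegel (m+1) := by
        unfold pvNegel
        by_cases h : m % 2 = 0
        · rw [if_pos (by exact_mod_cast h), if_pos (by omega)]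
        · rw [if_neg (by exact_mod_cast h), if_neg (by omega)]
      have h1 : pvFib (m+1) - (pvFib (m+1) - pvFib m) = pvFib (m+1+1) - pvFib (m+1) := by
        have : pvFib (m+1+1) = pvFib m + pvFib (m+1) := rfl
        rw [this]; ring
      simp only [List.foldl_cons, List.foldl_nil, hmod, h2, Prod.mk.injEq]
      refine ⟨h1, trivial, ?_⟩
      rw [hpos, hneg, ← hel]
      simp

theorem pvB_fold (m : Nat) :
    ((List.range m).foldl
      (fun (st : Int × Int × List Int) (_ : Nat) =>
        (st.2.1, st.1 + st.2.1, st.2.2 ++ [st.2.1]))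
      (0, 1, [0]))
    = (pvFib m, pvFib (m+1), pvPos m) := by
  induction m with
  | zero => simp [pvFib, pvPos]
  | succ m ih =>
      rw [List.range_succ, List.foldl_append, ih]
      simp only [List.foldl_cons, List.foldl_nil]
      refine Prod.ext rfl (Prod.ext ?_ ?_)
      · show pvFib m + pvFib (m+1) = pvFib (m+1+1)
        rfl
      · simp [pvPos, List.range_succ]

theorem pvPos_getD (m k : Nat) (h : k ≤ m) : (pvPos m).getD k 0 = pvFib k := by
  unfold pvPos
  rw [List.getD_eq_getElem?_getD, List.getElem?_map, List.getElem?_range (by omega)]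
  simp

theorem pvNeg_eq (m : Nat) :
    (((List.range m).map (fun k : Nat => (1:Int) + k)).reverse.map
      (fun k => if PySem.Int.mod k 2 = 1 then PySem.List.pyGetD (pvPos m) k 0
                else -(PySem.List.pyGetD (pvPos m) k 0))) = pvNeg m := by
  rw [List.map_reverse, List.map_map, pvNeg]
  congr 1
  apply List.map_congr_left
  intro j hj
  have hj' : j < m := List.mem_range.mp hj
  have hc : (fun k : Nat => (1:Int) + k) j = ((j+1 : Nat) : Int) := by push_cast; ring
  have hmm : PySem.Int.mod (((j+1 : Nat)) : Int) 2 = (((j+1) % 2 : Nat) : Int) := by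
    exact_mod_cast PySem.Int.mod_natCast (j+1) 2
  simp only [Function.comp, hc, hmm, PySem.List.pyGetD_natCast]
  rw [pvPos_getD m (j+1) (by omega)]
  unfold pvNegel
  by_cases h : (j+1) % 2 = 1
  · rw [if_pos (by exact_mod_cast h), if_pos h]
  · rw [if_neg (by exact_mod_cast h), if_neg h]

-- ===== VERDICT =====
theorem get_fib_list_spec : Claim_equal_get_fib_list := by
  intro n _
  unfold Spec_get_fib_list get_fib_list get_fib_list_alt
  rw [PySem.List.pyRange_neg_one_eq_reverse]
  rw [PySem.List.pyRange_one, PySem.List.pyRange_one]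
  have hm : ((n:Int) + 1 - (0 + 1)).toNat = (n - 0).toNat := by omega
  rw [hm]
  simp only [List.foldl_map, zero_add]
  rw [pvA_fold, pvB_fold, pvNeg_eq]
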